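-- pv_equiv track=rewrite | github.com/bakukun/codetree-TILs | 241104/가능한 수열 중 최솟값 구하기/find-min-of-possible-series.py | is_okay
-- ===== SOURCE A (Python) =====
-- def is_okay(ans):
--     length = len(ans) // 2
--     tmp = 1
--     for tmp in range(1, length + 1):
--         for i in range(len(ans) - tmp):
--             if (i + tmp * 2 > len(ans)):
--                 continue
--             if ans[i:i + tmp] == ans[i + tmp:i + tmp * 2]:
--                 return False
--     return True
-- ===== SOURCE B (Python) =====
-- def is_okay(ans):
--     n = len(ans)
--     for t in range(1, n // 2 + 1):
--         run = 0
--         for j in range(n - t):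
--             if ans[j] == ans[j + t]:
--                 run += 1
--                 if run >= t:
--                     return False
--             else:
--                 run = 0
--     return True
-- ===== Notes on version B (the rewrite author's own statement) =====
-- stated objective: faster
-- what changed: For each block length t, B makes one linear pass counting the run of consecutive positions j with ans[j]==ans[j+t] (a run of length t witnesses a tandem repeat), replacing A's slice comparison at every offset; O(n^2) instead of O(n^3).
import Mathlib
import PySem

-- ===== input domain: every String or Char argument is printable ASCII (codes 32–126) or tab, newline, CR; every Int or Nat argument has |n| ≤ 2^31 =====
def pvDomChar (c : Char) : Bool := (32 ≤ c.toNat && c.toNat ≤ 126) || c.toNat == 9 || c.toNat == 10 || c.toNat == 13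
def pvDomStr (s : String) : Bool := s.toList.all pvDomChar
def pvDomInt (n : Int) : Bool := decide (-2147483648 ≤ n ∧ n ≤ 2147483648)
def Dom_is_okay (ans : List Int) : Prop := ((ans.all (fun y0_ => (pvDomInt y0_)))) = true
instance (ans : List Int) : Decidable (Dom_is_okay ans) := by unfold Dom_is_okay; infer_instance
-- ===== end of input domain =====

-- B replaces A's per-offset slice comparison by, for each block length t, one linear
-- pass counting runs of consecutive positions j with ans[j] = ans[j+t]: O(n^2) vs O(n^3).


-- ===== PORT A =====
-- for tmp in range(1, len//2 + 1): for i in range(len - tmp): continue if i+tmp*2 > len;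
-- return False when ans[i:i+tmp] == ans[i+tmp:i+tmp*2].  Nat ranges are exact here (all
-- bounds nonneg); the compared slices are in range, so they are drop/take (exact).
def is_okay (ans : List Int) : Bool :=
  !((List.range' 1 (ans.length / 2)).any fun tmp =>
      (List.range (ans.length - tmp)).any fun i =>
        if i + tmp * 2 > ans.length then false
        else decide (((ans.drop i).take tmp) = ((ans.drop (i + tmp)).take tmp)))

-- ===== PORT B =====
-- inner loop of Source B for a fixed t: run counter over j; true when a tandem is found
def bLoop (ans : List Int) (t run j : Nat) : Bool :=
  if j < ans.length - t then
    if ans.getD j 0 = ans.getD (j + t) 0 then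
      if run + 1 ≥ t then true
      else bLoop ans t (run + 1) (j + 1)
    else bLoop ans t 0 (j + 1)
  else false
termination_by ans.length - t - j

def is_okay_alt (ans : List Int) : Bool :=
  !((List.range' 1 (ans.length / 2)).any fun t => bLoop ans t 0 0)

-- ===== PRECONDITION & SPEC =====
def Spec_is_okay (ans : List Int) (out : Bool) : Prop := out = is_okay_alt ans
instance (ans : List Int) (out : Bool) : Decidable (Spec_is_okay ans out) := by unfold Spec_is_okay; infer_instance

-- ===== CLAIM (what is proved, stated in full; the proofs are below) =====
def Claim_equal_is_okay : Prop := ∀ (ans : List Int), Dom_is_okay ans → Spec_is_okay ans (is_okay ans)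

-- ===== LEMMAS AND PROOFS =====

-- a tandem repeat of block length t starting at i, pointwise
def Tandem (ans : List Int) (t i : Nat) : Prop :=
  i + t * 2 ≤ ans.length ∧ ∀ k < t, ans.getD (i + k) 0 = ans.getD (i + t + k) 0

theorem slice_eq_iff (ans : List Int) (t i : Nat) (h : i + t * 2 ≤ ans.length) :
    ((ans.drop i).take t = (ans.drop (i + t)).take t)
      ↔ ∀ k < t, ans.getD (i + k) 0 = ans.getD (i + t + k) 0 := by
  have hl1 : ((ans.drop i).take t).length = t := by simp; omega
  have hl2 : ((ans.drop (i + t)).take t).length = t := by simp; omega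
  constructor
  · intro he k hk
    have h1 : i + k < ans.length := by omega
    have h2 : i + t + k < ans.length := by omega
    have hk1 : k < ((ans.drop i).take t).length := by omega
    have e := List.getElem_of_eq he hk1
    rw [List.getElem_take, List.getElem_drop, List.getElem_take, List.getElem_drop] at e
    rw [List.getD_eq_getElem ans 0 h1, List.getD_eq_getElem ans 0 h2]
    exact e
  · intro hp
    apply List.ext_getElem (by omega)
    intro k hk1 hk2
    have hkt : k < t := by omega
    have h1 : i + k < ans.length := by omega
    have h2 : i + t + k < ans.length := by omega
    have := hp k hkt
    rw [List.getD_eq_getElem ans 0 h1, List.getD_eq_getElem ans 0 h2] at this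
    simpa [List.getElem_take, List.getElem_drop] using this

-- A's inner loop over i finds a tandem of block length t iff one exists
theorem innerA_iff (ans : List Int) (t : Nat) (ht : 1 ≤ t) :
    (((List.range (ans.length - t)).any fun i =>
        if i + t * 2 > ans.length then false
        else decide (((ans.drop i).take t) = ((ans.drop (i + t)).take t))) = true)
      ↔ ∃ i, Tandem ans t i := by
  simp only [List.any_eq_true, List.mem_range]
  constructor
  · rintro ⟨i, hi, hcond⟩
    by_cases hgt : i + t * 2 > ans.length
    · rw [if_pos hgt] at hcond; exact absurd hcond (by simp)
    · rw [if_neg hgt] at hcond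
      refine ⟨i, by omega, ?_⟩
      exact (slice_eq_iff ans t i (by omega)).mp (by simpa using hcond)
  · rintro ⟨i, hle, hp⟩
    refine ⟨i, by omega, ?_⟩
    rw [if_neg (by omega)]
    simpa using (slice_eq_iff ans t i hle).mpr hp

-- run-scan invariant: with a current run of `run` matches ending just before j,
-- the scan succeeds iff a tandem starts at some i ≥ j - run
theorem bLoop_iff (ans : List Int) (t : Nat) (ht : 1 ≤ t) :
    ∀ j run, run ≤ j → run < t →
      (∀ k < run, ans.getD (j - run + k) 0 = ans.getD (j - run + k + t) 0) →
      (bLoop ans t run j = true ↔ ∃ i, j - run ≤ i ∧ Tandem ans t i) := by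
  have key : ∀ m j run, ans.length - t - j = m → run ≤ j → run < t →
      (∀ k < run, ans.getD (j - run + k) 0 = ans.getD (j - run + k + t) 0) →
      (bLoop ans t run j = true ↔ ∃ i, j - run ≤ i ∧ Tandem ans t i) := by
    intro m
    induction m with
    | zero =>
      intro j run hm hrj hrt hmatch
      rw [bLoop, if_neg (by omega)]
      constructor
      · intro h; exact absurd h (by simp)
      · rintro ⟨i, hi, hlen, _⟩
        exact absurd hlen (by omega)
    | succ m IH =>
      intro j run hm hrj hrt hmatch
      have hj : j < ans.length - t := by omega
      rw [bLoop, if_pos hj]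
      by_cases hmj : ans.getD j 0 = ans.getD (j + t) 0
      · rw [if_pos hmj]
        by_cases hrun : run + 1 ≥ t
        · rw [if_pos hrun]
          simp only [true_iff]
          have hre : run = t - 1 := by omega
          refine ⟨j - run, le_refl _, by omega, ?_⟩
          intro k hk
          by_cases hk' : k < run
          · have e := hmatch k hk'
            have e2 : j - run + k + t = j - run + t + k := by omega
            rw [e2] at e; exact e
          · have hkr : k = run := by omega
            have h1 : j - run + k = j := by omega
            have h2 : j - run + t + k = j + t := by omega
            rw [h1, h2]; exact hmj
        · rw [if_neg hrun]
          rw [IH (j + 1) (run + 1) (by omega) (by omega) (by omega) ?side]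
          case side =>
            intro k hk
            have he : j + 1 - (run + 1) = j - run := by omega
            rw [he]
            by_cases hk' : k < run
            · exact hmatch k hk'
            · have hkr : k = run := by omega
              have h1 : j - run + k = j := by omega
              rw [h1]; exact hmj
          constructor
          · rintro ⟨i, hi, hT⟩; exact ⟨i, by omega, hT⟩
          · rintro ⟨i, hi, hT⟩; exact ⟨i, by omega, hT⟩
      · rw [if_neg hmj]
        rw [IH (j + 1) 0 (by omega) (by omega) (by omega) (by intro k hk; omega)]
        constructor
        · rintro ⟨i, hi, hT⟩; exact ⟨i, by omega, hT⟩
        · rintro ⟨i, hi, hT⟩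
          refine ⟨i, ?_, hT⟩
          obtain ⟨hlen, hall⟩ := hT
          by_contra hlt'
          by_cases hc : i + t ≤ j
          · omega
          · have hij : i ≤ j := by omega
            have hjlt : j - i < t := by omega
            have e := hall (j - i) hjlt
            have h1 : i + (j - i) = j := by omega
            have h2 : i + t + (j - i) = j + t := by omega
            rw [h1, h2] at e
            exact hmj e
  intro j run
  exact key (ans.length - t - j) j run rfl

-- B's inner loop for a fixed t finds a tandem iff one exists
theorem innerB_iff (ans : List Int) (t : Nat) (ht : 1 ≤ t) :
    (bLoop ans t 0 0 = true) ↔ ∃ i, Tandem ans t i := by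
  rw [bLoop_iff ans t ht 0 0 (le_refl 0) (by omega) (by intro k hk; omega)]
  constructor
  · rintro ⟨i, _, hT⟩; exact ⟨i, hT⟩
  · rintro ⟨i, hT⟩; exact ⟨i, by omega, hT⟩

theorem any_congr_mem {α : Type} {p q : α → Bool} :
    ∀ (l : List α), (∀ a ∈ l, p a = q a) → l.any p = l.any q := by
  intro l h
  induction l with
  | nil => rfl
  | cons a l ih =>
    simp only [List.any_cons, h a (by simp), ih (fun b hb => h b (by simp [hb]))]

-- ===== VERDICT (by name: the statement is the Claim_ definition above) =====
theorem is_okay_spec : Claim_equal_is_okay := by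
  intro ans _
  unfold Spec_is_okay is_okay is_okay_alt
  congr 1
  apply any_congr_mem
  intro t ht
  have ht1 : 1 ≤ t := by
    simp only [List.mem_range'] at ht; omega
  have hA := innerA_iff ans t ht1
  have hB := innerB_iff ans t ht1
  by_cases h : ∃ i, Tandem ans t i
  · rw [hA.mpr h, hB.mpr h]
  · have hA' : _ ≠ true := fun hh => h (hA.mp hh)
    have hB' : _ ≠ true := fun hh => h (hB.mp hh)
    rw [Bool.eq_false_iff.mpr hA', Bool.eq_false_iff.mpr hB']
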